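-- pv_equiv track=rewrite | github.com/zhongzhh8/Video-Retrieval-C3D | DataProcess/CCV_download_train.py | GetClassid
-- ===== SOURCE A (Python) =====
-- def GetClassid(label_line):
--     index=0
--     for char in label_line:
--         if char=='0':
--             index+=1
--         elif char=='1':
--             return index
--     return -1
-- ===== SOURCE B (Python) =====
-- def GetClassid(label_line):
--     pos = label_line.find('1')
--     if pos == -1:
--         return -1
--     return label_line[:pos].count('0')
-- ===== Notes on version B (the rewrite author's own statement) =====
-- stated objective: simpler
-- what changed: Replaces A's single accumulating early-exit character loop by a find-then-count decomposition: locate the first occurrence with str.find and count the zeros in the prefix before it.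
import Mathlib
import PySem

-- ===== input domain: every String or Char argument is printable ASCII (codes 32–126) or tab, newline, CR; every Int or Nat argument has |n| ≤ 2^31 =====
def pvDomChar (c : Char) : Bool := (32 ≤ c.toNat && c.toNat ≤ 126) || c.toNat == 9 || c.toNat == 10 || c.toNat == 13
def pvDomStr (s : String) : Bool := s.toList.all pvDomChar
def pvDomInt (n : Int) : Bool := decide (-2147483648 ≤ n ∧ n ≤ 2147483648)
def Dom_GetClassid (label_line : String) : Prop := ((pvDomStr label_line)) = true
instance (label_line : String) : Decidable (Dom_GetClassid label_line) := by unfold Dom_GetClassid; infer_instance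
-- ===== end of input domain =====

-- B replaces A's accumulating early-exit loop by find-then-count: locate the first '1', count '0' in the prefix (simpler decomposition, same cost).

-- ===== PORT A =====
-- the 'for char in label_line' loop with accumulator `index` and early return
def GetClassidGo : List Char → Int → Int
  | [], _ => -1
  | c :: cs, index =>
    if c = '0' then GetClassidGo cs (index + 1)
    else if c = '1' then index
    else GetClassidGo cs index

def GetClassid (label_line : String) : Int :=
  GetClassidGo label_line.toList 0

-- ===== PORT B =====
def GetClassid_alt (label_line : String) : Int :=
  let pos := PySem.Str.find label_line "1"
  if pos = -1 then -1
  else (PySem.Str.count (PySem.Str.slice label_line none (some pos)) "0" : Int)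

-- ===== PRECONDITION & SPEC =====
def Spec_GetClassid (label_line : String) (out : Int) : Prop := out = GetClassid_alt label_line
instance (label_line : String) (out : Int) : Decidable (Spec_GetClassid label_line out) := by unfold Spec_GetClassid; infer_instance

-- ===== CLAIM (what is proved, stated in full; the proofs are below) =====
def Claim_equal_GetClassid : Prop := ∀ (label_line : String), Dom_GetClassid label_line → Spec_GetClassid label_line (GetClassid label_line)

-- ===== LEMMAS AND PROOFS =====

-- [c] is a prefix of l iff l starts with c
theorem pv_singleton_prefix (c : Char) (l : List Char) : [c] <+: l ↔ l.head? = some c := by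
  cases l with
  | nil => simp
  | cons h t => simp [List.cons_prefix_iff]

-- Chars.find for a single-character needle is findIdx?
theorem pv_find_singleton (cs : List Char) (c : Char) :
    PySem.Chars.find cs [c] = (cs.findIdx? (· == c)).elim (-1) (fun k => (k : Int)) := by
  cases h : cs.findIdx? (· == c) with
  | none =>
    rw [List.findIdx?_eq_none_iff] at h
    simp only [Option.elim]
    rw [PySem.Chars.find_eq_neg_one_iff]
    intro hinf
    have hc : c ∈ cs := hinf.subset (by simp)
    simpa using h c hc
  | some k =>
    rw [List.findIdx?_eq_some_iff_getElem] at h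
    obtain ⟨hk, hck, hmin⟩ := h
    have hdk : [c] <+: cs.drop k := by
      rw [pv_singleton_prefix, List.head?_drop, List.getElem?_eq_getElem hk]
      simpa using hck
    have hinf : [c] <:+: cs := hdk.isInfix.trans (List.drop_suffix k cs).isInfix
    have h0 : 0 ≤ PySem.Chars.find cs [c] := (PySem.Chars.find_nonneg_iff cs [c]).2 hinf
    obtain ⟨hpre, hm⟩ := PySem.Chars.find_spec h0
    have hfk : (PySem.Chars.find cs [c]).toNat = k := by
      rcases Nat.lt_trichotomy (PySem.Chars.find cs [c]).toNat k with hlt | heq | hgt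
      · -- find points before k: contradicts minimality of k
        rw [pv_singleton_prefix, List.head?_drop] at hpre
        have hlen : (PySem.Chars.find cs [c]).toNat < cs.length := lt_trans hlt hk
        rw [List.getElem?_eq_getElem hlen] at hpre
        have := hmin _ hlt
        simp_all
      · exact heq
      · exact absurd hdk (hm k hgt)
    simp only [Option.elim]
    omega

-- count.go for a single-character needle counts that character
theorem pv_count_go_singleton (c : Char) :
    ∀ (l : List Char) (fuel acc : Nat), l.length ≤ fuel →
      PySem.Chars.count.go [c] fuel l acc = acc + l.count c := by
  intro l
  induction l with
  | nil =>
    intro fuel acc _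
    cases fuel <;> simp [PySem.Chars.count.go]
  | cons h t ih =>
    intro fuel acc hf
    cases fuel with
    | zero => simp at hf
    | succ f =>
      by_cases hc : c = h
      · subst hc
        simp [PySem.Chars.count.go, List.isPrefixOf,
          ih f (acc + 1) (by simpa using hf)]
        omega
      · have : (c == h) = false := by simp [hc]
        simp [PySem.Chars.count.go, List.isPrefixOf, this,
          Ne.symm hc, ih f acc (by simpa using hf)]

theorem pv_count_singleton (cs : List Char) (c : Char) :
    PySem.Chars.count cs [c] = cs.count c := by
  simpa using pv_count_go_singleton c cs cs.length 0 le_rfl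

-- characterisation of A's loop
theorem pv_goA_eq (cs : List Char) : ∀ idx : Int,
    GetClassidGo cs idx =
      (cs.findIdx? (· == '1')).elim (-1) (fun k => idx + ((cs.take k).count '0' : Int)) := by
  induction cs with
  | nil => intro idx; simp [GetClassidGo]
  | cons c cs ih =>
    intro idx
    by_cases h0 : c = '0'
    · subst h0
      rw [show GetClassidGo ('0' :: cs) idx = GetClassidGo cs (idx + 1) by simp [GetClassidGo]]
      rw [ih (idx + 1)]
      cases hh : cs.findIdx? (· == '1') with
      | none => simp [List.findIdx?_cons, hh]
      | some k =>
        simp [List.findIdx?_cons, hh]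
        ring
    · by_cases h1 : c = '1'
      · subst h1
        simp [GetClassidGo, List.findIdx?_cons]
      · have hb1 : (c == '1') = false := by simp [h1]
        have hb0 : ('0' == c) = false := by simp [Ne.symm h0]
        rw [show GetClassidGo (c :: cs) idx = GetClassidGo cs idx by simp [GetClassidGo, h0, h1]]
        rw [ih idx]
        cases hh : cs.findIdx? (· == '1') with
        | none => simp [List.findIdx?_cons, hb1, hh]
        | some k => simp [List.findIdx?_cons, hb1, hh, h0]

-- ===== VERDICT (by name: the statement is the Claim_ definition above) =====
theorem GetClassid_spec : Claim_equal_GetClassid := by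
  intro s _
  unfold Spec_GetClassid GetClassid GetClassid_alt
  have hfind : PySem.Str.find s "1" =
      (s.toList.findIdx? (· == '1')).elim (-1) (fun k => (k : Int)) := by
    rw [PySem.Str.find_eq, show ("1" : String).toList = ['1'] from rfl, pv_find_singleton]
  rw [pv_goA_eq s.toList 0, hfind]
  cases hh : s.toList.findIdx? (· == '1') with
  | none => simp
  | some k =>
    have hkk : ((k : Int) = -1) = False := by simp
    simp only [Option.elim, hkk, if_false]
    rw [PySem.Str.count_eq, show ("0" : String).toList = ['0'] from rfl,
      PySem.Str.toList_slice, PySem.Chars.slice_eq_listSlice,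
      PySem.List.slice_to s.toList (by positivity), pv_count_singleton]
    simp
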